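-- pv_equiv track=rewrite | github.com/RuneLind/huginn | youtube_preprocess_md.py | _merge_with_chapters
-- ===== SOURCE A (Python) =====
-- def _merge_with_chapters(parsed_lines, chapters):
--     """Merge transcript lines with chapter headings inserted."""
--     result_parts = []
--     current_chapter_idx = 0
--     current_paragraph = []
--
--     # Track which chapters we've emitted
--     emitted_chapters = set()
--
--     for ts, text in parsed_lines:
--         # Check if we've reached a new chapter
--         if ts is not None:
--             while current_chapter_idx < len(chapters):
--                 ch_start, ch_title = chapters[current_chapter_idx]
--                 if ts >= ch_start and current_chapter_idx not in emitted_chapters: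
--                     # Flush current paragraph before chapter heading
--                     if current_paragraph:
--                         result_parts.append(" ".join(current_paragraph))
--                         current_paragraph = []
--                     result_parts.append(f"## {ch_title}")
--                     emitted_chapters.add(current_chapter_idx)
--                     current_chapter_idx += 1
--                 else:
--                     break
--
--         if not text:
--             if current_paragraph:
--                 result_parts.append(" ".join(current_paragraph))
--                 current_paragraph = []
--         else:
--             current_paragraph.append(text)
--
--     if current_paragraph:
--         result_parts.append(" ".join(current_paragraph))
--
--     return "\n\n".join(result_parts)
-- ===== SOURCE B (Python) =====
-- def _merge_with_chapters(parsed_lines, chapters):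
--     """Merge transcript lines with chapter headings inserted."""
--     # Pass 1: tokenize into a flat stream of heading / break / word tokens,
--     # consuming pending chapters from the front of a remainder list.
--     toks = []
--     rem = list(chapters)
--     for ts, text in parsed_lines:
--         if ts is not None:
--             while rem and ts >= rem[0][0]:
--                 toks.append(("h", rem[0][1]))
--                 rem = rem[1:]
--         toks.append(("w", text) if text else ("b", ""))
--     # Pass 2: group the token stream into markdown blocks; a paragraph is a
--     # maximal run of word tokens, break tokens only separate runs.
--     blocks = []
--     i, n = 0, len(toks)
--     while i < n:
--         kind, payload = toks[i]
--         if kind == "h":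
--             blocks.append("## " + payload)
--             i += 1
--         elif kind == "b":
--             i += 1
--         else:
--             j = i + 1
--             while j < n and toks[j][0] == "w":
--                 j += 1
--             blocks.append(" ".join(t[1] for t in toks[i:j]))
--             i = j
--     return "\n\n".join(blocks)
-- ===== Notes on version B (the rewrite author's own statement) =====
-- stated objective: alternative
-- what changed: A's single fused loop (paragraph accumulator, flush idiom, index+emitted-set over chapters) is replaced by tokenize-then-group: pass 1 flattens lines and due chapter headings into a flat token stream while consuming chapters from the front of a remainder list, pass 2 builds blocks by grouping maximal runs of word tokens, with no paragraph accumulator or emitted-set bookkeeping.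
import Mathlib
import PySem

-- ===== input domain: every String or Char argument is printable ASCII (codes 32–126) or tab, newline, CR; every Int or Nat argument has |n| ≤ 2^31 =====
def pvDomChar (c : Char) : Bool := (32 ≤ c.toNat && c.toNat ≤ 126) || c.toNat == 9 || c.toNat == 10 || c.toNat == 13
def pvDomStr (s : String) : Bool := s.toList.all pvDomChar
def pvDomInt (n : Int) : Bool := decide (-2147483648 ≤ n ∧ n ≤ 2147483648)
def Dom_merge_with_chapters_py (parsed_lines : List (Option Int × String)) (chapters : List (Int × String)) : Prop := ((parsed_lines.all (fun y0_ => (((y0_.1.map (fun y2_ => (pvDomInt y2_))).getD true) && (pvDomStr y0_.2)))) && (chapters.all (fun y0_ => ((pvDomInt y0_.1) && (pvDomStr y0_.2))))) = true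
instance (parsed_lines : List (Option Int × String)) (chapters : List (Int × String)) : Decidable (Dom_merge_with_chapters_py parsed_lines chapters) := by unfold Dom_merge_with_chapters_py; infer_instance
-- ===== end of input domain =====

-- B replaces A's single fused loop (paragraph accumulator + emitted-chapter set) by
-- tokenize-then-group: pass 1 flattens lines and due chapter headings into a token
-- stream, pass 2 groups maximal word-token runs into paragraphs ("alternative", not faster).

-- ===== PORT A =====
-- A's flush idiom: flush the current paragraph into result_parts if non-empty
def pvFlush (parts para : List String) : List String × List String :=
  if para = [] then (parts, para) else (parts ++ [PySem.Str.join " " para], [])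

-- A's inner while loop: emit chapter headings while ts >= chapters[idx][0] and idx not yet emitted
def mwcWhile (chapters : List (Int × String)) (ts : Int) (parts para : List String)
    (idx : Nat) (emitted : PySem.Set Nat) :
    List String × List String × Nat × PySem.Set Nat :=
  if h : idx < chapters.length then
    if chapters[idx].1 ≤ ts ∧ idx ∉ emitted then
      let f := pvFlush parts para
      mwcWhile chapters ts (f.1 ++ ["## " ++ chapters[idx].2]) f.2 (idx + 1)
        (PySem.Set.add emitted idx)
    else (parts, para, idx, emitted)
  else (parts, para, idx, emitted)
termination_by chapters.length - idx

-- A's loop body for one (ts, text) line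
def mwcStep (chapters : List (Int × String))
    (st : List String × List String × Nat × PySem.Set Nat) (line : Option Int × String) :
    List String × List String × Nat × PySem.Set Nat :=
  let st := match line.1 with
    | some ts => mwcWhile chapters ts st.1 st.2.1 st.2.2.1 st.2.2.2
    | none => st
  if line.2 = "" then
    let f := pvFlush st.1 st.2.1
    (f.1, f.2, st.2.2.1, st.2.2.2)
  else (st.1, st.2.1 ++ [line.2], st.2.2.1, st.2.2.2)

def merge_with_chapters_py (parsed_lines : List (Option Int × String)) (chapters : List (Int × String)) : String :=
  let st := parsed_lines.foldl (mwcStep chapters) ([], [], 0, PySem.Set.empty)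
  PySem.Str.join "\n\n" (pvFlush st.1 st.2.1).1

-- ===== PORT B =====
-- pass 1 inner while: pop due chapters from the front of rem, yielding heading tokens
def emitChs (ts : Int) : List (Int × String) → List (String × String) × List (Int × String)
  | [] => ([], [])
  | (s, t) :: rest =>
    if s ≤ ts then
      let r := emitChs ts rest
      (("h", t) :: r.1, r.2)
    else ([], (s, t) :: rest)

-- pass 1: the token stream (heading / break / word tokens), threading rem
def tokenizeB : List (Option Int × String) → List (Int × String) → List (String × String)
  | [], _ => []
  | (ots, text) :: rest, rem =>
    match ots with
    | some ts =>
      let e := emitChs ts rem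
      e.1 ++ ((if text = "" then ("b", "") else ("w", text)) :: tokenizeB rest e.2)
    | none => (if text = "" then ("b", "") else ("w", text)) :: tokenizeB rest rem

-- pass 2: group tokens into blocks; a paragraph is a maximal run of word tokens
def renderB : List (String × String) → List String
  | [] => []
  | (k, p) :: rest =>
    if k = "h" then ("## " ++ p) :: renderB rest
    else if k = "b" then renderB rest
    else
      PySem.Str.join " " (p :: (rest.takeWhile (fun t => t.1 == "w")).map Prod.snd) ::
        renderB (rest.dropWhile (fun t => t.1 == "w"))
termination_by toks => toks.length
decreasing_by
  · simp
  · simp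
  · have := List.Sublist.length_le (List.dropWhile_sublist (l := rest) (p := fun t => t.1 == "w"))
    simp; omega

def merge_with_chapters_py_alt (parsed_lines : List (Option Int × String)) (chapters : List (Int × String)) : String :=
  PySem.Str.join "\n\n" (renderB (tokenizeB parsed_lines chapters))

-- ===== PRECONDITION & SPEC =====
def Spec_merge_with_chapters_py (parsed_lines : List (Option Int × String)) (chapters : List (Int × String)) (out : String) : Prop := out = merge_with_chapters_py_alt parsed_lines chapters
instance (parsed_lines : List (Option Int × String)) (chapters : List (Int × String)) (out : String) : Decidable (Spec_merge_with_chapters_py parsed_lines chapters out) := by unfold Spec_merge_with_chapters_py; infer_instance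

-- ===== CLAIM (what is proved, stated in full; the proofs are below) =====
def Claim_equal_merge_with_chapters_py : Prop := ∀ (parsed_lines : List (Option Int × String)) (chapters : List (Int × String)), Dom_merge_with_chapters_py parsed_lines chapters → Spec_merge_with_chapters_py parsed_lines chapters (merge_with_chapters_py parsed_lines chapters)

-- ===== LEMMAS AND PROOFS =====

-- proof-side fold rendering of a token stream, mirroring A's per-line branches
def tokStep (st : List String × List String) (tok : String × String) :
    List String × List String :=
  if tok.1 = "h" then ((pvFlush st.1 st.2).1 ++ ["## " ++ tok.2], [])
  else if tok.2 = "" then pvFlush st.1 st.2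
  else (st.1, st.2 ++ [tok.2])

def flushP (para : List String) : List String :=
  if para = [] then [] else [PySem.Str.join " " para]

-- proof-side renderer with an explicit open paragraph
def renderAux (para : List String) : List (String × String) → List String
  | [] => flushP para
  | (k, p) :: rest =>
    if k = "h" then flushP para ++ ("## " ++ p) :: renderAux [] rest
    else if p = "" then flushP para ++ renderAux [] rest
    else renderAux (para ++ [p]) rest

-- invariant of A's emitted set: it holds only indices already passed
def pvInv (emitted : PySem.Set Nat) (idx : Nat) : Prop := ∀ j ∈ emitted, j < idx

theorem pvFlush_fst (parts para : List String) :
    (pvFlush parts para).1 = parts ++ flushP para := by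
  by_cases h : para = [] <;> simp [pvFlush, flushP, h]

theorem pvFlush_snd (parts para : List String) : (pvFlush parts para).2 = [] := by
  by_cases h : para = [] <;> simp [pvFlush, h]

theorem mwcWhile_eq (chapters : List (Int × String)) (ts : Int) :
    ∀ (idx : Nat) (emitted : PySem.Set Nat) (parts para : List String),
      pvInv emitted idx →
      ∃ idx' e', mwcWhile chapters ts parts para idx emitted =
          (((emitChs ts (chapters.drop idx)).1.foldl tokStep (parts, para)).1,
           ((emitChs ts (chapters.drop idx)).1.foldl tokStep (parts, para)).2,
           idx', e') ∧
        pvInv e' idx' ∧ (emitChs ts (chapters.drop idx)).2 = chapters.drop idx' := by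
  intro idx
  induction hn : chapters.length - idx using Nat.strong_induction_on generalizing idx with
  | _ n ih =>
    intro emitted parts para hinv
    rw [mwcWhile]
    by_cases h : idx < chapters.length
    · rw [dif_pos h]
      have hdrop : chapters.drop idx = chapters[idx] :: chapters.drop (idx + 1) :=
        List.drop_eq_getElem_cons h
      by_cases hts : chapters[idx].1 ≤ ts
      · have hnm : idx ∉ emitted := fun hm => absurd (hinv idx hm) (lt_irrefl idx)
        rw [if_pos ⟨hts, hnm⟩]
        have hlt : chapters.length - (idx + 1) < n := by omega
        have hinv' : pvInv (PySem.Set.add emitted idx) (idx + 1) := by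
          intro j hj
          rcases (PySem.Set.mem_add emitted idx j).1 hj with hj' | hj'
          · exact Nat.lt_succ_of_lt (hinv j hj')
          · omega
        obtain ⟨idx', e', heq, he', hrem⟩ := ih _ hlt (idx + 1) rfl (PySem.Set.add emitted idx)
          ((pvFlush parts para).1 ++ ["## " ++ chapters[idx].2]) (pvFlush parts para).2 hinv'
        refine ⟨idx', e', ?_, he', ?_⟩
        · rw [heq, hdrop]
          simp [emitChs, hts, tokStep, pvFlush_snd]
        · rw [hdrop]
          simpa [emitChs, hts] using hrem
      · rw [if_neg (by tauto)]
        refine ⟨idx, emitted, ?_, hinv, ?_⟩ <;> rw [hdrop] <;> simp [emitChs, hts]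
    · rw [dif_neg h]
      have : chapters.drop idx = [] := List.drop_eq_nil_of_le (by omega)
      exact ⟨idx, emitted, by simp [this, emitChs], hinv, by simp [this, emitChs]⟩

theorem mwc_main (chapters : List (Int × String)) :
    ∀ (lines : List (Option Int × String)) (parts para : List String) (idx : Nat)
      (emitted : PySem.Set Nat), pvInv emitted idx →
      ∃ idx' e', lines.foldl (mwcStep chapters) (parts, para, idx, emitted) =
          (((tokenizeB lines (chapters.drop idx)).foldl tokStep (parts, para)).1,
           ((tokenizeB lines (chapters.drop idx)).foldl tokStep (parts, para)).2,
           idx', e') := by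
  intro lines
  induction lines with
  | nil => intro parts para idx emitted hinv; exact ⟨idx, emitted, by simp [tokenizeB]⟩
  | cons l rest ih =>
    intro parts para idx emitted hinv
    obtain ⟨ots, text⟩ := l
    simp only [List.foldl_cons]
    cases ots with
    | none =>
      by_cases htext : text = ""
      · have h2 : mwcStep chapters (parts, para, idx, emitted) (none, text) =
            ((pvFlush parts para).1, (pvFlush parts para).2, idx, emitted) := by
          simp [mwcStep, htext]
        rw [h2]
        obtain ⟨idx', e', h3⟩ := ih (pvFlush parts para).1 (pvFlush parts para).2 idx emitted hinv
        refine ⟨idx', e', ?_⟩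
        rw [h3]
        simp [tokenizeB, htext, tokStep]
      · have h2 : mwcStep chapters (parts, para, idx, emitted) (none, text) =
            (parts, para ++ [text], idx, emitted) := by
          simp [mwcStep, htext]
        rw [h2]
        obtain ⟨idx', e', h3⟩ := ih parts (para ++ [text]) idx emitted hinv
        refine ⟨idx', e', ?_⟩
        rw [h3]
        simp [tokenizeB, htext, tokStep]
    | some ts =>
      obtain ⟨idx1, e1, hw, hinv1, hrem⟩ := mwcWhile_eq chapters ts idx emitted parts para hinv
      set st1 := (emitChs ts (chapters.drop idx)).1.foldl tokStep (parts, para) with hst1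
      have hline : mwcStep chapters (parts, para, idx, emitted) (some ts, text) =
          ((tokStep st1 (if text = "" then ("b", "") else ("w", text))).1,
           (tokStep st1 (if text = "" then ("b", "") else ("w", text))).2, idx1, e1) := by
        by_cases htext : text = "" <;>
          simp [mwcStep, hw, htext, tokStep]
      rw [hline]
      obtain ⟨idx', e', h3⟩ := ih _ _ idx1 e1 hinv1
      refine ⟨idx', e', ?_⟩
      rw [h3]
      have htok : tokenizeB ((some ts, text) :: rest) (chapters.drop idx) =
          (emitChs ts (chapters.drop idx)).1 ++
            ((if text = "" then ("b", "") else ("w", text)) ::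
              tokenizeB rest (chapters.drop idx1)) := by
        simp [tokenizeB, hrem]
      rw [htok]
      simp [List.foldl_append, hst1]

-- fold rendering equals the explicit-paragraph renderer
theorem foldl_tokStep_renderAux :
    ∀ (toks : List (String × String)) (parts para : List String),
      (pvFlush ((toks.foldl tokStep (parts, para)).1) ((toks.foldl tokStep (parts, para)).2)).1 =
        parts ++ renderAux para toks := by
  intro toks
  induction toks with
  | nil => intro parts para; simp [renderAux, pvFlush_fst]
  | cons t rest ih =>
    intro parts para
    obtain ⟨k, p⟩ := t
    by_cases hk : k = "h"
    · simp only [List.foldl_cons, tokStep, hk]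
      rw [ih]
      simp [renderAux, pvFlush_fst]
    · by_cases hp : p = ""
      · simp only [List.foldl_cons, tokStep, hp, hk]
        rw [← Prod.mk.eta (p := pvFlush parts para), ih]
        simp [renderAux, hk, pvFlush_fst, pvFlush_snd]
      · simp only [List.foldl_cons, tokStep, if_neg hk, if_neg hp]
        rw [ih]
        simp [renderAux, hk, hp]

-- well-formed tokens: heading, empty break, or non-empty word
def WFtok (t : String × String) : Prop :=
  t.1 = "h" ∨ (t.1 = "b" ∧ t.2 = "") ∨ (t.1 = "w" ∧ t.2 ≠ "")

theorem emitChs_wf (ts : Int) : ∀ (rem : List (Int × String)), ∀ t ∈ (emitChs ts rem).1, WFtok t := by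
  intro rem
  induction rem with
  | nil => simp [emitChs]
  | cons c rest ih =>
    obtain ⟨s, ti⟩ := c
    by_cases hs : s ≤ ts
    · simp only [emitChs, if_pos hs]
      intro t ht
      rcases List.mem_cons.1 ht with h | h
      · subst h; exact Or.inl rfl
      · exact ih t h
    · simp [emitChs, hs]

theorem tokenizeB_wf :
    ∀ (lines : List (Option Int × String)) (rem : List (Int × String)),
      ∀ t ∈ tokenizeB lines rem, WFtok t := by
  intro lines
  induction lines with
  | nil => simp [tokenizeB]
  | cons l rest ih =>
    intro rem t ht
    obtain ⟨ots, text⟩ := l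
    cases ots with
    | none =>
      simp only [tokenizeB] at ht
      rcases List.mem_cons.1 ht with h | h
      · subst h
        by_cases htext : text = "" <;> simp [WFtok, htext]
      · exact ih rem t h
    | some ts =>
      simp only [tokenizeB] at ht
      rcases List.mem_append.1 ht with h | h
      · exact emitChs_wf ts rem t h
      · rcases List.mem_cons.1 h with h' | h'
        · subst h'
          by_cases htext : text = "" <;> simp [WFtok, htext]
        · exact ih _ t h'

-- renderAux with a non-empty open paragraph absorbs the next word-run
theorem renderAux_run :
    ∀ (toks : List (String × String)) (para : List String),
      (∀ t ∈ toks, WFtok t) → para ≠ [] →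
      renderAux para toks =
        PySem.Str.join " " (para ++ (toks.takeWhile (fun t => t.1 == "w")).map Prod.snd) ::
          renderAux [] (toks.dropWhile (fun t => t.1 == "w")) := by
  intro toks
  induction toks with
  | nil => intro para _ hpara; simp [renderAux, flushP, hpara]
  | cons t rest ih =>
    intro para hwf hpara
    obtain ⟨k, p⟩ := t
    rcases hwf (k, p) (List.mem_cons_self) with hk | ⟨hk, hp⟩ | ⟨hk, hp⟩
    · simp only at hk; subst hk
      simp [renderAux, flushP, hpara, List.takeWhile, List.dropWhile]
    · simp only at hk hp; subst hk; subst hp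
      simp [renderAux, flushP, hpara, List.takeWhile, List.dropWhile]
    · simp only at hk hp; subst hk
      have hrest : ∀ t ∈ rest, WFtok t := fun t ht => hwf t (List.mem_cons_of_mem _ ht)
      simp only [renderAux, if_neg (by decide : ¬ ("w" : String) = "h"), if_neg hp]
      rw [ih (para ++ [p]) hrest (by simp)]
      simp [List.takeWhile, List.dropWhile]
    
-- renderAux with no open paragraph is renderB
theorem renderAux_renderB :
    ∀ (toks : List (String × String)), (∀ t ∈ toks, WFtok t) →
      renderAux [] toks = renderB toks := by
  intro toks
  induction hn : toks.length using Nat.strong_induction_on generalizing toks with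
  | _ n ih =>
    match toks with
    | [] => simp [renderAux, renderB, flushP]
    | (k, p) :: rest =>
      intro hwf
      have hrest : ∀ t ∈ rest, WFtok t := fun t ht => hwf t (List.mem_cons_of_mem _ ht)
      rcases hwf (k, p) (List.mem_cons_self) with hk | ⟨hk, hp⟩ | ⟨hk, hp⟩
      · simp only at hk; subst hk
        rw [renderB]
        have ihr := ih rest.length (by simp at hn; omega) rest rfl hrest
        simp [renderAux, flushP, ihr]
      · simp only at hk hp; subst hk; subst hp
        rw [renderB]
        have ihr := ih rest.length (by simp at hn; omega) rest rfl hrest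
        simp [renderAux, flushP, ihr]
      · simp only at hk hp; subst hk
        rw [renderB]
        simp only [renderAux, if_neg (by decide : ¬ ("w" : String) = "h"), if_neg hp,
          List.nil_append]
        rw [renderAux_run rest [p] hrest (by simp)]
        have ihr := ih (rest.dropWhile (fun t => t.1 == "w")).length
            (by have := List.Sublist.length_le
                  (List.dropWhile_sublist (l := rest) (p := fun t => t.1 == "w"))
                simp at hn; omega)
            _ rfl (fun t ht => hrest t ((List.dropWhile_sublist
                (l := rest) (p := fun t => t.1 == "w")).subset ht))
        rw [ihr]
        simp

-- ===== VERDICT (by name: the statement is the Claim_ definition above) =====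
theorem merge_with_chapters_py_spec : Claim_equal_merge_with_chapters_py := by
  intro parsed_lines chapters _
  unfold Spec_merge_with_chapters_py merge_with_chapters_py merge_with_chapters_py_alt
  dsimp only
  obtain ⟨idx', e', heq⟩ := mwc_main chapters parsed_lines [] [] 0 PySem.Set.empty
    (by intro j hj; simp [PySem.Set.empty] at hj)
  rw [List.drop_zero] at heq
  rw [heq]
  dsimp only
  rw [foldl_tokStep_renderAux]
  rw [renderAux_renderB _ (tokenizeB_wf parsed_lines chapters)]
  simp
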